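-- pv_equiv track=rewrite | github.com/ty-hayes-82/data-analyst-agent | data_analyst_agent/sub_agents/executive_brief_agent/report_utils.py | _extract_scoped_cards_from_report
-- ===== SOURCE A (Python) =====
-- def _extract_scoped_cards_from_report(
--     report_md: str,
--     scope_entity_lower: str,
--     children_lower: set[str],
--     max_cards: int = 4,
-- ) -> str:
--     """Extract card blocks from rendered markdown that reference scoped entities."""
--     in_section = False
--     section_lines: list[str] = []
--     for line in report_md.splitlines():
--         if line.startswith("## Insight Cards"):
--             in_section = True
--             continue
--         if in_section:
--             if line.startswith("## ") and "Insight Cards" not in line: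
--                 break
--             section_lines.append(line)
--     if not section_lines:
--         return ""
--     blocks: list[str] = []
--     current: list[str] = []
--     for line in section_lines:
--         if line.startswith("### ") and current:
--             blocks.append("\n".join(current).strip())
--             current = [line]
--         else:
--             current.append(line)
--     if current:
--         blocks.append("\n".join(current).strip())
--     matching: list[str] = []
--     for block in blocks:
--         block_lower = block.lower()
--         if scope_entity_lower in block_lower or any(c in block_lower for c in children_lower):
--             matching.append(block)
--             if len(matching) >= max_cards:
--                 break
--     return "\n\n".join(matching)
-- ===== SOURCE B (Python) =====
-- def _extract_scoped_cards_from_report(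
--     report_md: str,
--     scope_entity_lower: str,
--     children_lower: set[str],
--     max_cards: int = 4,
-- ) -> str:
--     """Single-pass state machine: collect, split and filter card blocks in one scan."""
--     matching: list[str] = []
--
--     def matches(block: str) -> bool:
--         block_lower = block.lower()
--         return scope_entity_lower in block_lower or any(c in block_lower for c in children_lower)
--
--     in_section = False
--     current: list[str] = []
--     for line in report_md.splitlines():
--         if line.startswith("## Insight Cards"):
--             in_section = True
--             continue
--         if not in_section:
--             continue
--         if line.startswith("## ") and "Insight Cards" not in line:
--             break
--         if line.startswith("### ") and current:
--             block = "\n".join(current).strip()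
--             if matches(block):
--                 matching.append(block)
--                 if len(matching) >= max_cards:
--                     return "\n\n".join(matching)
--             current = [line]
--         else:
--             current.append(line)
--     if current:
--         block = "\n".join(current).strip()
--         if matches(block):
--             matching.append(block)
--     return "\n\n".join(matching)
-- ===== Notes on version B (the rewrite author's own statement) =====
-- stated objective: simpler
-- what changed: Replaced A's three sequential passes (collect section lines, then split them into blocks, then filter blocks with a cap) by one single-pass state machine over the lines that finalizes and filters each block as soon as it is complete.
import Mathlib
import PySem

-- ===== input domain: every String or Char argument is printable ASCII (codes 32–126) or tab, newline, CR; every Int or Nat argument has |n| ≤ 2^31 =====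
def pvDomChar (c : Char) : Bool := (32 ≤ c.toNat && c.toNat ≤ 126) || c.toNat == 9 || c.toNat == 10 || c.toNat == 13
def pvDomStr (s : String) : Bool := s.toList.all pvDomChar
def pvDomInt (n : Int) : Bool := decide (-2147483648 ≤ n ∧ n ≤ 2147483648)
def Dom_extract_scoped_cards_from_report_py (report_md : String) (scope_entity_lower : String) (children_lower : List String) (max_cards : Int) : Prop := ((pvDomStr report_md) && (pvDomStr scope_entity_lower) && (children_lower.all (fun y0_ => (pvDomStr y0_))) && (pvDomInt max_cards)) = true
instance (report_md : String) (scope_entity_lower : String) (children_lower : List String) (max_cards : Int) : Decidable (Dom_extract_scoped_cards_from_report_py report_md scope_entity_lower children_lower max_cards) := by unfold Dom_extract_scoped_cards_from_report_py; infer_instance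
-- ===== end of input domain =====

-- B replaces A's three sequential passes (collect section lines, split into blocks, filter blocks)
-- by a single-pass state machine over the lines; objective: simpler (one scan, one loop state).

-- shared predicate: the card-matching test, identical source text in both Pythons
def pvCardMatch (scope_entity_lower : String) (children_lower : List String) (block : String) : Bool :=
  let block_lower := PySem.Str.lower block
  PySem.Str.isIn scope_entity_lower block_lower || children_lower.any (fun c => PySem.Str.isIn c block_lower)

-- ===== PORT A =====
-- A phase 1: collect the lines of the "## Insight Cards" section (break at the next '## ' header)
def pvCollectSec : List String → Bool → List String
  | [], _ => []
  | l :: ls, inSec =>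
    if PySem.Str.startswith l "## Insight Cards" then pvCollectSec ls true
    else if inSec then
      if PySem.Str.startswith l "## " && !PySem.Str.isIn "Insight Cards" l then []
      else l :: pvCollectSec ls inSec
    else pvCollectSec ls inSec

-- A phase 2: split the section lines into blocks at '### ' headings (strip each block)
def pvSplitBlocks : List String → List String → List String
  | [], cur => if cur.isEmpty then [] else [PySem.Str.strip (PySem.Str.join "\n" cur)]
  | l :: ls, cur =>
    if PySem.Str.startswith l "### " && !cur.isEmpty then
      PySem.Str.strip (PySem.Str.join "\n" cur) :: pvSplitBlocks ls [l]
    else pvSplitBlocks ls (cur ++ [l])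

-- A phase 3: keep matching blocks, break once max_cards are kept
def pvMatchLoop (scope_entity_lower : String) (children_lower : List String) (max_cards : Int) : List String → List String → List String
  | [], m => m
  | b :: bs, m =>
    if pvCardMatch scope_entity_lower children_lower b then
      let m' := m ++ [b]
      if max_cards ≤ (m'.length : Int) then m'
      else pvMatchLoop scope_entity_lower children_lower max_cards bs m'
    else pvMatchLoop scope_entity_lower children_lower max_cards bs m

def extract_scoped_cards_from_report_py (report_md : String) (scope_entity_lower : String) (children_lower : List String) (max_cards : Int) : String :=
  let section_lines := pvCollectSec (PySem.Str.splitlines report_md) false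
  if section_lines.isEmpty then ""
  else PySem.Str.join "\n\n" (pvMatchLoop scope_entity_lower children_lower max_cards (pvSplitBlocks section_lines []) [])

-- ===== PORT B =====
-- B trailing step: finalize the pending block (strip, test, maybe keep)
def pvFinalize (scope_entity_lower : String) (children_lower : List String) (cur m : List String) : List String :=
  if cur.isEmpty then m
  else
    let b := PySem.Str.strip (PySem.Str.join "\n" cur)
    if pvCardMatch scope_entity_lower children_lower b then m ++ [b] else m

-- B: one pass over the lines with state (in_section, current block, matching so far)
def pvScan (scope_entity_lower : String) (children_lower : List String) (max_cards : Int) : List String → Bool → List String → List String → List String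
  | [], _, cur, m => pvFinalize scope_entity_lower children_lower cur m
  | l :: ls, inSec, cur, m =>
    if PySem.Str.startswith l "## Insight Cards" then
      pvScan scope_entity_lower children_lower max_cards ls true cur m
    else if !inSec then
      pvScan scope_entity_lower children_lower max_cards ls inSec cur m
    else if PySem.Str.startswith l "## " && !PySem.Str.isIn "Insight Cards" l then
      pvFinalize scope_entity_lower children_lower cur m
    else if PySem.Str.startswith l "### " && !cur.isEmpty then
      let b := PySem.Str.strip (PySem.Str.join "\n" cur)
      if pvCardMatch scope_entity_lower children_lower b then
        let m' := m ++ [b]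
        if max_cards ≤ (m'.length : Int) then m'
        else pvScan scope_entity_lower children_lower max_cards ls inSec [l] m'
      else pvScan scope_entity_lower children_lower max_cards ls inSec [l] m
    else pvScan scope_entity_lower children_lower max_cards ls inSec (cur ++ [l]) m

def extract_scoped_cards_from_report_py_alt (report_md : String) (scope_entity_lower : String) (children_lower : List String) (max_cards : Int) : String :=
  PySem.Str.join "\n\n" (pvScan scope_entity_lower children_lower max_cards (PySem.Str.splitlines report_md) false [] [])

-- ===== PRECONDITION & SPEC =====
def Spec_extract_scoped_cards_from_report_py (report_md : String) (scope_entity_lower : String) (children_lower : List String) (max_cards : Int) (out : String) : Prop := out = extract_scoped_cards_from_report_py_alt report_md scope_entity_lower children_lower max_cards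
instance (report_md : String) (scope_entity_lower : String) (children_lower : List String) (max_cards : Int) (out : String) : Decidable (Spec_extract_scoped_cards_from_report_py report_md scope_entity_lower children_lower max_cards out) := by unfold Spec_extract_scoped_cards_from_report_py; infer_instance

-- ===== CLAIM (what is proved, stated in full; the proofs are below) =====
def Claim_equal_extract_scoped_cards_from_report_py : Prop := ∀ (report_md : String) (scope_entity_lower : String) (children_lower : List String) (max_cards : Int), Dom_extract_scoped_cards_from_report_py report_md scope_entity_lower children_lower max_cards → Spec_extract_scoped_cards_from_report_py report_md scope_entity_lower children_lower max_cards (extract_scoped_cards_from_report_py report_md scope_entity_lower children_lower max_cards)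

-- ===== LEMMAS AND PROOFS =====

-- B's trailing finalize equals A's phase 2+3 run on an exhausted line list.
theorem pvFinalize_eq (sc : String) (ch : List String) (mc : Int) (cur m : List String) :
    pvFinalize sc ch cur m = pvMatchLoop sc ch mc (pvSplitBlocks [] cur) m := by
  unfold pvFinalize pvSplitBlocks
  by_cases hc : cur.isEmpty = true
  · rw [if_pos hc, if_pos hc]
    rfl
  · rw [if_neg hc, if_neg hc]
    simp only [pvMatchLoop]
    by_cases hp : pvCardMatch sc ch (PySem.Str.strip (PySem.Str.join "\n" cur)) = true
    · rw [if_pos hp, if_pos hp]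
      split_ifs with h
      · rfl
      · rfl
    · rw [if_neg hp, if_neg hp]

-- While in the section, B's scan computes exactly phase3 ∘ phase2 of A's remaining section lines.
theorem pvScan_true (sc : String) (ch : List String) (mc : Int) (ls : List String) (cur m : List String) :
    pvScan sc ch mc ls true cur m = pvMatchLoop sc ch mc (pvSplitBlocks (pvCollectSec ls true) cur) m := by
  induction ls generalizing cur m with
  | nil =>
    simp only [pvScan, pvCollectSec]
    exact pvFinalize_eq sc ch mc cur m
  | cons l ls ih =>
    simp only [pvScan, pvCollectSec]
    by_cases h1 : PySem.Str.startswith l "## Insight Cards" = true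
    · rw [if_pos h1, if_pos h1]
      exact ih cur m
    · rw [if_neg h1, if_neg h1]
      rw [if_neg (show ¬((!true) = true) by decide), if_pos trivial]
      by_cases h2 : (PySem.Str.startswith l "## " && !PySem.Str.isIn "Insight Cards" l) = true
      · rw [if_pos h2, if_pos h2]
        exact pvFinalize_eq sc ch mc cur m
      · rw [if_neg h2, if_neg h2]
        simp only [pvSplitBlocks]
        by_cases h3 : (PySem.Str.startswith l "### " && !cur.isEmpty) = true
        · rw [if_pos h3, if_pos h3]
          simp only [pvMatchLoop]
          by_cases hp : pvCardMatch sc ch (PySem.Str.strip (PySem.Str.join "\n" cur)) = true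
          · rw [if_pos hp, if_pos hp]
            by_cases hcap : mc ≤ ((m ++ [PySem.Str.strip (PySem.Str.join "\n" cur)]).length : Int)
            · rw [if_pos hcap, if_pos hcap]
            · rw [if_neg hcap, if_neg hcap]
              exact ih [l] _
          · rw [if_neg hp, if_neg hp]
            exact ih [l] m
        · rw [if_neg h3, if_neg h3]
          exact ih (cur ++ [l]) m

-- Before the section header is seen, B skips lines exactly as A's phase 1 does.
theorem pvScan_false (sc : String) (ch : List String) (mc : Int) (ls : List String) (m : List String) :
    pvScan sc ch mc ls false [] m = pvMatchLoop sc ch mc (pvSplitBlocks (pvCollectSec ls false) []) m := by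
  induction ls with
  | nil =>
    simp only [pvScan, pvCollectSec, pvFinalize, pvSplitBlocks, pvMatchLoop, List.isEmpty_nil, if_true]
  | cons l ls ih =>
    simp only [pvScan, pvCollectSec]
    by_cases h1 : PySem.Str.startswith l "## Insight Cards" = true
    · rw [if_pos h1, if_pos h1]
      exact pvScan_true sc ch mc ls [] m
    · rw [if_neg h1, if_neg h1]
      rw [if_pos (show (!false) = true by decide), if_neg (show ¬(false = true) by decide)]
      exact ih

-- ===== VERDICT (by name: the statement is the Claim_ definition above) =====
theorem extract_scoped_cards_from_report_py_spec : Claim_equal_extract_scoped_cards_from_report_py := by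
  intro report_md sc ch mc _
  unfold Spec_extract_scoped_cards_from_report_py
  unfold extract_scoped_cards_from_report_py extract_scoped_cards_from_report_py_alt
  rw [pvScan_false]
  by_cases hs : (pvCollectSec (PySem.Str.splitlines report_md) false).isEmpty = true
  · rw [if_pos hs]
    rw [List.isEmpty_iff] at hs
    rw [hs]
    simp only [pvSplitBlocks, List.isEmpty_nil, if_true, pvMatchLoop]
    rfl
  · rw [if_neg hs]
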